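-- pv_equiv track=rewrite | github.com/cadenshokat/SolanAI | src/wallet_tracker/wallet_tracker.py | get_popular_tokens
-- ===== SOURCE A (Python) =====
-- from collections import defaultdict
--
-- def get_popular_tokens(wallet_transfers, min_wallets=2):
--
--     token_counts = defaultdict(int)  # Stores {token: number_of_unique_wallets_that_bought_it}
--     token_wallets = defaultdict(set)
--
--     for wallet, transfers in wallet_transfers.items():
--         for transfer in transfers:
--             token = transfer['token_address']
--             token_wallets[token].add(wallet)
--
--     for token, wallets in token_wallets.items():
--         token_counts[token] = len(wallets)
--
--     popular_tokens = {token: count for token, count in token_counts.items() if count >= min_wallets}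
--
--     return popular_tokens  # Returns {token: num_unique_wallets}
-- ===== SOURCE B (Python) =====
-- def get_popular_tokens(wallet_transfers, min_wallets=2):
--     # First pass: tokens in order of first appearance.
--     tokens = []
--     for transfers in wallet_transfers.values():
--         for transfer in transfers:
--             token = transfer['token_address']
--             if token not in tokens:
--                 tokens.append(token)
--     # For each token, rescan the wallets and count those that transferred it.
--     # Wallets are dict keys, hence unique, so this is the unique-wallet count.
--     popular_tokens = {}
--     for token in tokens:
--         count = 0
--         for transfers in wallet_transfers.values():
--             if any(transfer['token_address'] == token for transfer in transfers):
--                 count += 1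
--         if count >= min_wallets:
--             popular_tokens[token] = count
--     return popular_tokens
-- ===== Notes on version B (the rewrite author's own statement) =====
-- stated objective: alternative
-- what changed: B keeps no per-token wallet sets at all: it first lists tokens in order of first appearance, then for each token rescans the wallet items and counts wallets having a transfer of that token (wallet keys are unique, so this equals the unique-wallet count) - a brute-force rescan replacing A's dict-of-sets accumulation; Pre_ excludes transfers lacking the 'token_address' key (KeyError in both) and association lists with duplicate wallet keys, which represent no Python dict.
import Mathlib
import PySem

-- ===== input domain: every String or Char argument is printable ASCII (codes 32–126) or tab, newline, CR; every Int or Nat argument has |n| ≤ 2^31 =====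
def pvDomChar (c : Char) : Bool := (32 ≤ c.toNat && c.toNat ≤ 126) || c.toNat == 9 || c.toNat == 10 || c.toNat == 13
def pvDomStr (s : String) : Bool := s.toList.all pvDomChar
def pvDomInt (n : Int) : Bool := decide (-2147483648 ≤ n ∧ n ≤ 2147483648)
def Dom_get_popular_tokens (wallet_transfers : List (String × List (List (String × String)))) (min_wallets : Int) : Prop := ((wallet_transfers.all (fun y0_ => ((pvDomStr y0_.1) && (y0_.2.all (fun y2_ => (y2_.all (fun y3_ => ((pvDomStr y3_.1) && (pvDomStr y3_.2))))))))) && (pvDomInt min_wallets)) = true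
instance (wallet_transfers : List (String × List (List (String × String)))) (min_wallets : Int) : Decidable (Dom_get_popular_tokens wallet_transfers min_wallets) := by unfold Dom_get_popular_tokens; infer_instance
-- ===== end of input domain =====

-- B drops A's dict-of-wallet-sets: it lists tokens by first appearance, then for each
-- token rescans the wallets and counts those having a transfer of it (objective: alternative).

-- transfer['token_address'] (both Pythons evaluate exactly this expression)
def pvTokOf (transfer : List (String × String)) : String :=
  (PySem.Dict.mk transfer).getD "token_address" ""

-- ===== PORT A =====
def get_popular_tokens (wallet_transfers : List (String × List (List (String × String)))) (min_wallets : Int) : List (String × Int) :=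
  let token_wallets : PySem.Dict String (PySem.Set String) :=
    wallet_transfers.foldl (fun tw p =>
      p.2.foldl (fun tw transfer =>
        let token := pvTokOf transfer
        tw.insert token (PySem.Set.add (tw.getD token PySem.Set.empty) p.1)) tw)
      PySem.Dict.empty
  let token_counts : PySem.Dict String Int :=
    token_wallets.items.foldl (fun tc q => tc.insert q.1 (PySem.Set.len q.2)) PySem.Dict.empty
  -- dict comprehension over token_counts (unique keys) keeping counts ≥ min_wallets
  token_counts.items.filter (fun q => decide (min_wallets ≤ q.2))

-- ===== PORT B =====
def get_popular_tokens_alt (wallet_transfers : List (String × List (List (String × String)))) (min_wallets : Int) : List (String × Int) :=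
  let tokens : List String :=
    wallet_transfers.foldl (fun ts p =>
      p.2.foldl (fun ts transfer =>
        let token := pvTokOf transfer
        if token ∈ ts then ts else ts ++ [token]) ts) []
  tokens.foldl (fun res token =>
    let count : Int :=
      wallet_transfers.foldl (fun c p =>
        if p.2.any (fun transfer => pvTokOf transfer == token) then c + 1 else c) 0
    if min_wallets ≤ count then res ++ [(token, count)] else res) []

-- ===== PRECONDITION & SPEC =====
-- Pre_ excludes (a) inputs where some transfer dict lacks the key 'token_address' — there
-- Python A raises KeyError (B raises too) — and (b) association lists whose wallet keys
-- repeat, which represent no Python dict (a dict's keys are unique by construction).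
def Pre_get_popular_tokens (wallet_transfers : List (String × List (List (String × String)))) (min_wallets : Int) : Prop :=
  (∀ p ∈ wallet_transfers, ∀ transfer ∈ p.2, "token_address" ∈ transfer.map Prod.fst) ∧
  (wallet_transfers.map Prod.fst).Nodup
instance (wallet_transfers : List (String × List (List (String × String)))) (min_wallets : Int) : Decidable (Pre_get_popular_tokens wallet_transfers min_wallets) := by unfold Pre_get_popular_tokens; infer_instance

def pvWitness_get_popular_tokens : (List (String × List (List (String × String)))) × Int :=
  ([("w1", [[("token_address", "T")]]), ("w2", [[("token_address", "T")]])], 2)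

def Spec_get_popular_tokens (wallet_transfers : List (String × List (List (String × String)))) (min_wallets : Int) (out : List (String × Int)) : Prop := out = get_popular_tokens_alt wallet_transfers min_wallets
instance (wallet_transfers : List (String × List (List (String × String)))) (min_wallets : Int) (out : List (String × Int)) : Decidable (Spec_get_popular_tokens wallet_transfers min_wallets out) := by unfold Spec_get_popular_tokens; infer_instance

-- ===== CLAIM (what is proved, stated in full; the proofs are below) =====
def Claim_equal_get_popular_tokens : Prop := ∀ (wallet_transfers : List (String × List (List (String × String)))) (min_wallets : Int), Dom_get_popular_tokens wallet_transfers min_wallets → Pre_get_popular_tokens wallet_transfers min_wallets → Spec_get_popular_tokens wallet_transfers min_wallets (get_popular_tokens wallet_transfers min_wallets)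

-- ===== LEMMAS AND PROOFS =====

-- does entry p contain a transfer of token t
def pvHas (t : String) (p : String × List (List (String × String))) : Bool :=
  p.2.any (fun transfer => pvTokOf transfer == t)

-- A's outer-loop body
def pvStepA (tw : PySem.Dict String (PySem.Set String)) (p : String × List (List (String × String))) : PySem.Dict String (PySem.Set String) :=
  p.2.foldl (fun tw transfer =>
    let token := pvTokOf transfer
    tw.insert token (PySem.Set.add (tw.getD token PySem.Set.empty) p.1)) tw

-- B's first pass (tokens in order of first appearance)
def pvToks (wt : List (String × List (List (String × String)))) : List String :=
  wt.foldl (fun ts p =>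
    p.2.foldl (fun ts transfer =>
      if pvTokOf transfer ∈ ts then ts else ts ++ [pvTokOf transfer]) ts) []

lemma pvIfMem_eq_add (ts : List String) (x : String) :
    (if x ∈ ts then ts else ts ++ [x]) = PySem.Set.add ts x := by
  by_cases h : x ∈ ts
  · rw [if_pos h, PySem.Set.add_of_mem h]
  · rw [if_neg h, PySem.Set.add_of_not_mem h]

lemma pvKeys_stepA (p : String × List (List (String × String))) (tw : PySem.Dict String (PySem.Set String)) :
    (pvStepA tw p).keys =
      p.2.foldl (fun ts transfer => if pvTokOf transfer ∈ ts then ts else ts ++ [pvTokOf transfer]) tw.keys := by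
  have h : (pvStepA tw p).keys = PySem.Set.update tw.keys (p.2.map pvTokOf) :=
    PySem.Dict.keys_foldl_insert_key p.2 pvTokOf
      (fun tw transfer => PySem.Set.add (tw.getD (pvTokOf transfer) PySem.Set.empty) p.1) tw
  have hf : (fun (ts : List String) (transfer : List (String × String)) =>
      if pvTokOf transfer ∈ ts then ts else ts ++ [pvTokOf transfer])
      = fun ts transfer => PySem.Set.add ts (pvTokOf transfer) := by
    funext ts tr; exact pvIfMem_eq_add ts (pvTokOf tr)
  rw [h, PySem.Set.update_map_eq_foldl_add, hf]

lemma pvKeys_aux (wt : List (String × List (List (String × String)))) :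
    ∀ tw : PySem.Dict String (PySem.Set String),
      (wt.foldl pvStepA tw).keys
        = wt.foldl (fun ts p => p.2.foldl (fun ts transfer =>
            if pvTokOf transfer ∈ ts then ts else ts ++ [pvTokOf transfer]) ts) tw.keys := by
  induction wt with
  | nil => intro tw; rfl
  | cons p rest ih =>
    intro tw
    simp only [List.foldl_cons]
    rw [ih (pvStepA tw p), pvKeys_stepA]

lemma pvKeys_eq_tokens (wt : List (String × List (List (String × String)))) :
    (wt.foldl pvStepA PySem.Dict.empty).keys = pvToks wt := by
  rw [pvKeys_aux]; rfl

lemma pvNodup_keys (wt : List (String × List (List (String × String)))) :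
    (wt.foldl pvStepA PySem.Dict.empty).keys.Nodup := by
  have aux : ∀ (l : List (String × List (List (String × String)))) (tw : PySem.Dict String (PySem.Set String)),
      tw.keys.Nodup → (l.foldl pvStepA tw).keys.Nodup := by
    intro l
    induction l with
    | nil => intro tw h; exact h
    | cons p rest ih =>
      intro tw h
      have h' : (pvStepA tw p).keys.Nodup :=
        PySem.Dict.nodup_keys_foldl_insert_key p.2 pvTokOf
          (fun d transfer => PySem.Set.add (d.getD (pvTokOf transfer) PySem.Set.empty) p.1) tw h
      exact ih (pvStepA tw p) h'
  exact aux wt PySem.Dict.empty PySem.Dict.nodup_keys_empty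

lemma pvInnerGetD (w : String) (trs : List (List (String × String)))
    (tw : PySem.Dict String (PySem.Set String)) (t : String) :
    ((trs.foldl (fun tw transfer =>
        tw.insert (pvTokOf transfer) (PySem.Set.add (tw.getD (pvTokOf transfer) PySem.Set.empty) w)) tw).getD t PySem.Set.empty)
      = if trs.any (fun transfer => pvTokOf transfer == t) = true ∧ w ∉ tw.getD t PySem.Set.empty
        then tw.getD t PySem.Set.empty ++ [w] else tw.getD t PySem.Set.empty := by
  induction trs generalizing tw with
  | nil => simp
  | cons tr rest ih =>
    simp only [List.foldl_cons, List.any_cons]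
    rw [ih]
    have hg : (tw.insert (pvTokOf tr) (PySem.Set.add (tw.getD (pvTokOf tr) PySem.Set.empty) w)).getD t PySem.Set.empty
        = if t = pvTokOf tr then PySem.Set.add (tw.getD (pvTokOf tr) PySem.Set.empty) w
          else tw.getD t PySem.Set.empty := by
      rw [PySem.Dict.getD_insert]
    by_cases ht : t = pvTokOf tr
    · have hbe : (pvTokOf tr == t) = true := by simp [ht]
      by_cases hw : w ∈ tw.getD t PySem.Set.empty
      · have hadd : PySem.Set.add (tw.getD (pvTokOf tr) PySem.Set.empty) w = tw.getD t PySem.Set.empty := by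
          rw [← ht, PySem.Set.add_of_mem hw]
        rw [hg, if_pos ht, hadd]
        have h1 : ¬((rest.any fun transfer => pvTokOf transfer == t) = true ∧
            w ∉ tw.getD t PySem.Set.empty) := fun hc => hc.2 hw
        have h2 : ¬(((pvTokOf tr == t) || rest.any fun transfer => pvTokOf transfer == t) = true ∧
            w ∉ tw.getD t PySem.Set.empty) := fun hc => hc.2 hw
        rw [if_neg h1, if_neg h2]
      · have hadd : PySem.Set.add (tw.getD (pvTokOf tr) PySem.Set.empty) w
            = tw.getD t PySem.Set.empty ++ [w] := by
          rw [← ht, PySem.Set.add_of_not_mem hw]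
        have hw2 : w ∈ tw.getD t PySem.Set.empty ++ [w] := by simp
        rw [hg, if_pos ht, hadd]
        have h1 : ¬((rest.any fun transfer => pvTokOf transfer == t) = true ∧
            w ∉ tw.getD t PySem.Set.empty ++ [w]) := fun hc => hc.2 hw2
        have h2 : ((pvTokOf tr == t) || rest.any fun transfer => pvTokOf transfer == t) = true ∧
            w ∉ tw.getD t PySem.Set.empty := ⟨by simp [hbe], hw⟩
        rw [if_neg h1, if_pos h2]
    · have hbe : (pvTokOf tr == t) = false := by simp [Ne.symm ht]
      rw [hg, if_neg ht]
      simp [hbe]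

lemma pvOuterGetD (t : String) :
    ∀ (wt : List (String × List (List (String × String)))) (tw : PySem.Dict String (PySem.Set String)),
      (∀ t' w', w' ∈ tw.getD t' PySem.Set.empty → w' ∉ wt.map Prod.fst) →
      (wt.map Prod.fst).Nodup →
      (wt.foldl pvStepA tw).getD t PySem.Set.empty
        = tw.getD t PySem.Set.empty ++ (wt.filter (pvHas t)).map Prod.fst := by
  intro wt
  induction wt with
  | nil => intro tw _ _; simp
  | cons p rest ih =>
    intro tw hS hnd
    have hnd' : (rest.map Prod.fst).Nodup := by
      rw [List.map_cons, List.nodup_cons] at hnd; exact hnd.2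
    have hp1r : p.1 ∉ rest.map Prod.fst := by
      rw [List.map_cons, List.nodup_cons] at hnd; exact hnd.1
    have hp1 : ∀ t', p.1 ∉ tw.getD t' PySem.Set.empty := by
      intro t' h; exact hS t' p.1 h (by simp)
    have hstep : ∀ t', (pvStepA tw p).getD t' PySem.Set.empty
        = tw.getD t' PySem.Set.empty ++ (if pvHas t' p = true then [p.1] else []) := by
      intro t'
      have h := pvInnerGetD p.1 p.2 tw t'
      by_cases hh : p.2.any (fun transfer => pvTokOf transfer == t') = true
      · have hht : pvHas t' p = true := hh
        rw [show (pvStepA tw p).getD t' PySem.Set.empty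
            = ((p.2.foldl (fun tw transfer =>
                tw.insert (pvTokOf transfer) (PySem.Set.add (tw.getD (pvTokOf transfer) PySem.Set.empty) p.1)) tw).getD t' PySem.Set.empty) from rfl,
          h, if_pos ⟨hh, hp1 t'⟩, if_pos hht]
      · have hht : pvHas t' p = false := Bool.eq_false_iff.mpr hh
        rw [show (pvStepA tw p).getD t' PySem.Set.empty
            = ((p.2.foldl (fun tw transfer =>
                tw.insert (pvTokOf transfer) (PySem.Set.add (tw.getD (pvTokOf transfer) PySem.Set.empty) p.1)) tw).getD t' PySem.Set.empty) from rfl,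
          h, if_neg (fun hc => hh hc.1), if_neg (by simp [hht])]
        simp
    have hS' : ∀ t' w', w' ∈ (pvStepA tw p).getD t' PySem.Set.empty → w' ∉ rest.map Prod.fst := by
      intro t' w' hw'
      rw [hstep t'] at hw'
      rcases List.mem_append.mp hw' with h1 | h2
      · intro hr; exact hS t' w' h1 (by simp [hr])
      · have hwp : w' = p.1 := by
          by_cases hc : pvHas t' p = true
          · rw [if_pos hc] at h2; simpa using h2
          · rw [if_neg hc] at h2; simp at h2
        rw [hwp]; exact hp1r
    simp only [List.foldl_cons]
    rw [ih (pvStepA tw p) hS' hnd', hstep t, List.append_assoc]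
    by_cases hp : pvHas t p = true
    · simp [List.filter_cons, hp]
    · have hp' : pvHas t p = false := Bool.eq_false_iff.mpr hp
      simp [List.filter_cons, hp']

lemma pvCount (wt : List (String × List (List (String × String)))) (t : String) :
    ∀ c0 : Int,
      wt.foldl (fun c p => if p.2.any (fun transfer => pvTokOf transfer == t) then c + 1 else c) c0
        = c0 + ((wt.filter (pvHas t)).length : Int) := by
  induction wt with
  | nil => intro c0; simp
  | cons p rest ih =>
    intro c0
    simp only [List.foldl_cons]
    by_cases h : p.2.any (fun transfer => pvTokOf transfer == t) = true
    · have hh : pvHas t p = true := h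
      rw [if_pos h, ih (c0 + 1)]
      simp only [List.filter_cons, hh, if_pos, List.length_cons]
      push_cast
      omega
    · have hh : pvHas t p = false := Bool.eq_false_iff.mpr h
      rw [if_neg h, ih c0]
      simp [List.filter_cons, hh]

lemma pvBuild (n : String → Int) (mw : Int) (ts : List String) (res : List (String × Int)) :
    ts.foldl (fun res t => if mw ≤ n t then res ++ [(t, n t)] else res) res
      = res ++ (ts.map (fun t => (t, n t))).filter (fun q => decide (mw ≤ q.2)) := by
  induction ts generalizing res with
  | nil => simp
  | cons t rest ih =>
    simp only [List.foldl_cons, List.map_cons, List.filter_cons]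
    by_cases h : mw ≤ n t
    · rw [if_pos h, ih]; simp [h]
    · rw [if_neg h, ih]; simp [h]

-- ===== VERDICT (by name: the statement is the Claim_ definition above) =====
theorem get_popular_tokens_spec : Claim_equal_get_popular_tokens := by
  intro wt mw _ hpre
  obtain ⟨_, hnd⟩ := hpre
  unfold Spec_get_popular_tokens
  have hndK : (wt.foldl pvStepA PySem.Dict.empty).keys.Nodup := pvNodup_keys wt
  have hTW : ∀ t, (wt.foldl pvStepA PySem.Dict.empty).getD t PySem.Set.empty
      = (wt.filter (pvHas t)).map Prod.fst := by
    intro t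
    have hS : ∀ t' w', w' ∈ (PySem.Dict.empty : PySem.Dict String (PySem.Set String)).getD t' PySem.Set.empty
        → w' ∉ wt.map Prod.fst := by
      intro t' w' hmem
      rw [PySem.Dict.getD_empty] at hmem
      simp [PySem.Set.empty] at hmem
    have h := pvOuterGetD t wt PySem.Dict.empty hS hnd
    rw [h, PySem.Dict.getD_empty]
    simp [PySem.Set.empty]
  have hA : get_popular_tokens wt mw
      = ((wt.foldl pvStepA PySem.Dict.empty).keys.map
          (fun k => (k, PySem.Set.len ((wt.foldl pvStepA PySem.Dict.empty).getD k PySem.Set.empty)))).filter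
          (fun q => decide (mw ≤ q.2)) := by
    show ((((wt.foldl pvStepA PySem.Dict.empty).items).foldl
        (fun tc q => tc.insert q.1 (PySem.Set.len q.2)) PySem.Dict.empty).items).filter
        (fun q => decide (mw ≤ q.2)) = _
    rw [PySem.Dict.items_foldl_insert_fresh _ Prod.fst (fun q => PySem.Set.len q.2)
        PySem.Dict.empty (fun a _ => PySem.Dict.contains_empty a.1) hndK]
    rw [PySem.Dict.items_eq_map_keys _ hndK PySem.Set.empty]
    simp [PySem.Dict.empty, List.map_map, Function.comp_def]
  have hB : get_popular_tokens_alt wt mw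
      = ((pvToks wt).map (fun t => (t,
          wt.foldl (fun c p => if p.2.any (fun transfer => pvTokOf transfer == t) then c + 1 else c) 0))).filter
          (fun q => decide (mw ≤ q.2)) := by
    have hb0 : get_popular_tokens_alt wt mw
        = (pvToks wt).foldl (fun res token =>
            if mw ≤ (wt.foldl (fun c p => if p.2.any (fun transfer => pvTokOf transfer == token) then c + 1 else c) 0)
            then res ++ [(token,
              wt.foldl (fun c p => if p.2.any (fun transfer => pvTokOf transfer == token) then c + 1 else c) 0)]
            else res) [] := rfl
    rw [hb0, pvBuild]
    simp
  rw [hA, hB, pvKeys_eq_tokens]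
  simp only [hTW, pvCount, PySem.Set.len_eq, List.length_map]
  simp
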